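-- pv_equiv track=rewrite | github.com/dujh22/math-feedback | pipelineForDataAnnotation.py | all_alpha
-- ===== SOURCE A (Python) =====
-- def all_alpha(str):
--     if str == 'x': # 特例
--         return False
--     if all(temp.isalpha() for temp in str):
--         return True
--     if any(temp.isalpha() for temp in str):
--         if any(temp.isdigit() for temp in str) == False:
--             return True
--
--     return False
-- ===== SOURCE B (Python) =====
-- def all_alpha(str):
--     has_alpha = False
--     has_digit = False
--     for c in str:
--         if c.isalpha():
--             has_alpha = True
--         if c.isdigit():
--             has_digit = True
--         if has_alpha and has_digit:
--             break
--     if str == 'x':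
--         return False
--     return str == '' or (has_alpha and not has_digit)
-- ===== Notes on version B (the rewrite author's own statement) =====
-- stated objective: simpler
-- what changed: Replaces A's three separate all/any generator scans with one single-pass loop maintaining has_alpha/has_digit flags (early break once both are set), followed by one boolean combination.
import Mathlib
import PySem

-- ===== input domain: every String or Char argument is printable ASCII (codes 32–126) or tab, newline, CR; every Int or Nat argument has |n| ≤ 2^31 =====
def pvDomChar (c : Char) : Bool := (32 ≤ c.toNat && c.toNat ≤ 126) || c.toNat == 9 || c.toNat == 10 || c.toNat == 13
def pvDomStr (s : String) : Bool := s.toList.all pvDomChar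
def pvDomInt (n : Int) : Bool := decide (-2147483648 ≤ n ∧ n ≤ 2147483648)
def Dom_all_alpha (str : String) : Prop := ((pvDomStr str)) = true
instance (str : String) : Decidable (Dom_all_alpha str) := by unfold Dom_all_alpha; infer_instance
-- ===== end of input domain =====

-- B replaces A's three separate all/any scans by one single-pass loop carrying
-- has_alpha/has_digit flags (early break once both are set); objective: simpler.


-- ===== PORT A =====
def all_alpha (str : String) : Bool :=
  if str == "x" then false
  else if str.toList.all (fun temp => PySem.Chars.isalpha temp) then true
  else if str.toList.any (fun temp => PySem.Chars.isalpha temp) then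
    if (str.toList.any (fun temp => PySem.Chars.isdigit temp)) == false then true
    else false
  else false

-- ===== PORT B =====
-- the for-loop of Source B: flags (has_alpha, has_digit), early break once both are set
def altLoop : List Char → Bool → Bool → Bool × Bool
  | [], ha, hd => (ha, hd)
  | c :: cs, ha, hd =>
    let ha := if PySem.Chars.isalpha c then true else ha
    let hd := if PySem.Chars.isdigit c then true else hd
    if ha && hd then (ha, hd) else altLoop cs ha hd

def all_alpha_alt (str : String) : Bool :=
  let p := altLoop str.toList false false
  if str == "x" then false
  else str == "" || (p.1 && !p.2)

-- ===== PRECONDITION & SPEC =====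
def Spec_all_alpha (str : String) (out : Bool) : Prop := out = all_alpha_alt str
instance (str : String) (out : Bool) : Decidable (Spec_all_alpha str out) := by unfold Spec_all_alpha; infer_instance

-- ===== CLAIM (what is proved, stated in full; the proofs are below) =====
def Claim_equal_all_alpha : Prop := ∀ (str : String), Dom_all_alpha str → Spec_all_alpha str (all_alpha str)

-- ===== LEMMAS AND PROOFS =====

-- the early-break loop computes exactly (ha ∨ any isalpha, hd ∨ any isdigit)
theorem altLoop_eq (cs : List Char) (ha hd : Bool) :
    altLoop cs ha hd = (ha || cs.any (fun temp => PySem.Chars.isalpha temp),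
                        hd || cs.any (fun temp => PySem.Chars.isdigit temp)) := by
  induction cs generalizing ha hd with
  | nil => simp [altLoop]
  | cons c cs ih =>
    cases hA : PySem.Chars.isalpha c <;> cases hD : PySem.Chars.isdigit c <;>
      cases ha <;> cases hd <;> simp [altLoop, hA, hD, ih]

-- on printable ASCII, an alphabetic character is never a digit
theorem alpha_not_digit (c : Char) (hc : pvDomChar c = true)
    (h : PySem.Chars.isalpha c = true) : PySem.Chars.isdigit c = false := by
  simp only [PySem.Chars.isalpha, PySem.Chars.isupper, PySem.Chars.islower,
    PySem.Chars.isdigit, Char.le_def, UInt32.le_iff_toNat_le, Bool.or_eq_true,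
    Bool.and_eq_true, decide_eq_true_eq, Bool.and_eq_false_iff,
    decide_eq_false_iff_not, not_le] at *
  have h0 : ('0').val.toNat = 48 := rfl
  have h9 : ('9').val.toNat = 57 := rfl
  have hA : ('A').val.toNat = 65 := rfl
  have hZ : ('Z').val.toNat = 90 := rfl
  have ha : ('a').val.toNat = 97 := rfl
  have hz : ('z').val.toNat = 122 := rfl
  omega

-- A's three-scan decision equals B's flag combination, on any ASCII char list
theorem key (l : List Char) (hdom : ∀ d ∈ l, pvDomChar d = true) :
    (if l.all (fun temp => PySem.Chars.isalpha temp) then true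
     else if l.any (fun temp => PySem.Chars.isalpha temp) then
       if (l.any (fun temp => PySem.Chars.isdigit temp)) == false then true
       else false
     else false)
    = (l.isEmpty || ((l.any (fun temp => PySem.Chars.isalpha temp)) &&
        !(l.any (fun temp => PySem.Chars.isdigit temp)))) := by
  cases l with
  | nil => simp
  | cons c cs =>
    by_cases hall : (c :: cs).all (fun temp => PySem.Chars.isalpha temp) = true
    · have hany : (c :: cs).any (fun temp => PySem.Chars.isalpha temp) = true := by
        simp only [List.any_eq_true]
        exact ⟨c, List.mem_cons_self .., List.all_eq_true.mp hall c (List.mem_cons_self ..)⟩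
      have hnod : (c :: cs).any (fun temp => PySem.Chars.isdigit temp) = false := by
        simp only [List.any_eq_false, Bool.not_eq_true]
        intro d hd
        exact alpha_not_digit d (hdom d hd) (List.all_eq_true.mp hall d hd)
      rw [if_pos hall]
      simp [hany, hnod]
    · cases hany : (c :: cs).any (fun temp => PySem.Chars.isalpha temp) <;>
      cases hnod : (c :: cs).any (fun temp => PySem.Chars.isdigit temp) <;>
        simp [hall, hany, hnod]

-- ===== VERDICT (by name: the statement is the Claim_ definition above) =====
theorem all_alpha_spec : Claim_equal_all_alpha := by
  intro str hdom
  have hdom' : ∀ d ∈ str.toList, pvDomChar d = true := by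
    simpa [Dom_all_alpha, pvDomStr, List.all_eq_true] using hdom
  have he : (str == "") = str.toList.isEmpty := by
    rw [Bool.eq_iff_iff]
    simp [beq_iff_eq, List.isEmpty_iff, String.toList_eq_nil_iff]
  unfold Spec_all_alpha all_alpha all_alpha_alt
  by_cases hx : (str == "x") = true
  · simp [hx]
  · simp only [hx, Bool.false_eq_true, if_false, altLoop_eq, Bool.false_or, he]
    exact key str.toList hdom'
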